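-- pv_equiv track=rewrite | github.com/oasm95/RV32I | Simulation/software/Cache/lru.py | getTouchedBits
-- ===== SOURCE A (Python) =====
-- def getTouchedBits(way,ways):
--     bitstouched = {}
--     nodebits = ways - 1 - ways//2
--     bitcnt = (way)//2 + nodebits
--     mask = 0
--     andmask = (1&way)<<bitcnt
--     while True:
--         mask|= 1<<bitcnt
--         tmp = bitcnt
--         bitcnt = (bitcnt-1)//2
--         if bitcnt >=0:
--             andmask|= (1&(~tmp))<<bitcnt
--         else:
--             break
--     for _ in range(ways-1):
--         if mask & (1<<_):
--             bitstouched[_] = 0 if andmask & (1<<_) else 1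
--
--     return bitstouched
-- ===== SOURCE B (Python) =====
-- def getTouchedBits(way, ways):
--     # Walk the pseudo-LRU tree path directly (O(log ways)) instead of
--     # scanning all ways-1 bit positions.
--     b = way // 2 + ways - 1 - ways // 2
--     setbit = 1 & way
--     pairs = []
--     while b >= 0:
--         if b < ways - 1:
--             pairs.append((b, 0 if setbit else 1))
--         setbit = 1 - (b & 1)
--         b = (b - 1) // 2
--     pairs.reverse()
--     return dict(pairs)
-- ===== Notes on version B (the rewrite author's own statement) =====
-- stated objective: faster
-- what changed: B walks the pseudo-LRU tree path once and records each touched bit (index, value) directly during the logarithmic climb, instead of building mask/andmask bitmasks and then scanning all ways-1 bit positions.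
import Mathlib
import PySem

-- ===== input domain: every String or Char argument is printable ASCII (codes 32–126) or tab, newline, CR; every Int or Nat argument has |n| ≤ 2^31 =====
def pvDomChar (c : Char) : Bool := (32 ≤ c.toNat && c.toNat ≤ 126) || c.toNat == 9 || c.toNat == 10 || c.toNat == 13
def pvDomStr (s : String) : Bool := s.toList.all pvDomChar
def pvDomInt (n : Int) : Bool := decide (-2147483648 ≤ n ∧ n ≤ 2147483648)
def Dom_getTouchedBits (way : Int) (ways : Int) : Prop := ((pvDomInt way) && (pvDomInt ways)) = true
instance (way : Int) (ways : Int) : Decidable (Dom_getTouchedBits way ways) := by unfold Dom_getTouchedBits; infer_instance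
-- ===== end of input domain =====

-- B records the touched pseudo-LRU bits directly during the logarithmic climb of the tree
-- instead of building bitmasks and scanning all ways-1 positions (objective: faster).

-- ===== PORT A =====
-- the 'while True' loop of A: state (mask, andmask, bitcnt)
def pvALoop (mask andmask bitcnt : Int) : Int × Int :=
  if _h0 : bitcnt < 0 then (mask, andmask)  -- unreachable under Pre_ (Python raised '1 << negative' before the loop)
  else
    let mask' := PySem.Int.bor mask (1 <<< bitcnt.toNat)
    let bitcnt' := PySem.Int.floordiv (bitcnt - 1) 2
    if _h : 0 ≤ bitcnt' then
      pvALoop mask' (PySem.Int.bor andmask (PySem.Int.band 1 (Int.not bitcnt) <<< bitcnt'.toNat)) bitcnt'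
    else (mask', andmask)
termination_by bitcnt.toNat
decreasing_by
  have h2 := PySem.Int.floordiv_eq_ediv_of_pos (a := bitcnt - 1) (by omega : (0:Int) < 2)
  omega

def getTouchedBits (way : Int) (ways : Int) : List (Int × Int) :=
  let nodebits := ways - 1 - PySem.Int.floordiv ways 2
  let bitcnt := PySem.Int.floordiv way 2 + nodebits
  if bitcnt < 0 then []  -- Python raises ValueError('negative shift count') here; excluded by Pre_
  else
    let andmask0 := PySem.Int.band 1 way <<< bitcnt.toNat
    let p := pvALoop 0 andmask0 bitcnt
    ((PySem.List.pyRange 0 (ways - 1) 1).foldl (fun d i =>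
        if PySem.Int.band p.1 (1 <<< i.toNat) ≠ 0 then
          d.insert i (if PySem.Int.band p.2 (1 <<< i.toNat) ≠ 0 then (0:Int) else 1)
        else d) (PySem.Dict.empty : PySem.Dict Int Int)).items

-- ===== PORT B =====
-- the 'while b >= 0' loop of B: collects (bit, value) pairs along the tree path
def pvBLoop (b setbit ways : Int) (pairs : List (Int × Int)) : List (Int × Int) :=
  if _h : b < 0 then pairs
  else
    pvBLoop (PySem.Int.floordiv (b - 1) 2) (1 - PySem.Int.band b 1) ways
      (if b < ways - 1 then pairs ++ [(b, if setbit ≠ 0 then 0 else 1)] else pairs)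
termination_by (b + 1).toNat
decreasing_by
  have h2 : PySem.Int.floordiv (b - 1) 2 = (b - 1) / 2 :=
    PySem.Int.floordiv_eq_ediv_of_pos (by omega)
  omega

def getTouchedBits_alt (way : Int) (ways : Int) : List (Int × Int) :=
  let b := PySem.Int.floordiv way 2 + ways - 1 - PySem.Int.floordiv ways 2
  let setbit := PySem.Int.band 1 way
  let pairs := pvBLoop b setbit ways []
  (PySem.Dict.ofList pairs.reverse : PySem.Dict Int Int).items

-- ===== PRECONDITION & SPEC =====
-- Pre_ excludes exactly the inputs on which A raises ValueError('negative shift count')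
-- (the initial bit index way//2 + ways - 1 - ways//2 is negative).
def Pre_getTouchedBits (way : Int) (ways : Int) : Prop :=
  0 ≤ PySem.Int.floordiv way 2 + ways - 1 - PySem.Int.floordiv ways 2
instance (way : Int) (ways : Int) : Decidable (Pre_getTouchedBits way ways) := by unfold Pre_getTouchedBits; infer_instance
def pvWitness_getTouchedBits : Int × Int := (1, 4)

def Spec_getTouchedBits (way : Int) (ways : Int) (out : List (Int × Int)) : Prop := out = getTouchedBits_alt way ways
instance (way : Int) (ways : Int) (out : List (Int × Int)) : Decidable (Spec_getTouchedBits way ways out) := by unfold Spec_getTouchedBits; infer_instance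

-- ===== CLAIM (what is proved, stated in full; the proofs are below) =====
def Claim_equal_getTouchedBits : Prop := ∀ (way : Int) (ways : Int), Dom_getTouchedBits way ways → Pre_getTouchedBits way ways → Spec_getTouchedBits way ways (getTouchedBits way ways)
-- ===== LEMMAS AND PROOFS =====

-- the path of tree nodes touched on an access, with their new values, keys strictly decreasing
def pvPath (b s : Int) : List (Int × Int) :=
  if _h : b < 0 then []
  else (b, if s ≠ 0 then 0 else 1) :: pvPath (PySem.Int.floordiv (b - 1) 2) (1 - PySem.Int.band b 1)
termination_by (b + 1).toNat
decreasing_by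
  have h2 : PySem.Int.floordiv (b - 1) 2 = (b - 1) / 2 :=
    PySem.Int.floordiv_eq_ediv_of_pos (by omega)
  omega

-- the mask accumulated by A's loop from node b down
def pvM (b : Int) : Int :=
  if _h : b < 0 then 0
  else PySem.Int.bor (1 <<< b.toNat) (pvM (PySem.Int.floordiv (b - 1) 2))
termination_by (b + 1).toNat
decreasing_by
  have h2 : PySem.Int.floordiv (b - 1) 2 = (b - 1) / 2 :=
    PySem.Int.floordiv_eq_ediv_of_pos (by omega)
  omega

-- the full andmask (root contribution included) from node b with root value bit s
def pvA (b s : Int) : Int :=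
  if _h : b < 0 then 0
  else PySem.Int.bor (s <<< b.toNat) (pvA (PySem.Int.floordiv (b - 1) 2) (1 - PySem.Int.band b 1))
termination_by (b + 1).toNat
decreasing_by
  have h2 : PySem.Int.floordiv (b - 1) 2 = (b - 1) / 2 :=
    PySem.Int.floordiv_eq_ediv_of_pos (by omega)
  omega

lemma pvBit_iff {x : Int} (hx : 0 ≤ x) (i : Nat) :
    (PySem.Int.band x (1 <<< i) ≠ 0) ↔ x.toNat.testBit i := by
  rw [PySem.Int.band_of_nonneg hx (Int.natCast_nonneg _)]
  simp only [Int.toNat_natCast, Nat.shiftLeft_eq, Nat.one_mul, Nat.and_two_pow]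
  rcases h : x.toNat.testBit i <;> simp

lemma pvM_nonneg (b : Int) : 0 ≤ pvM b := by
  induction b using pvM.induct with
  | case1 b h => rw [pvM.eq_def]; simp [h]
  | case2 b h ih =>
    rw [pvM.eq_def]; simp only [h, dif_neg]
    rw [PySem.Int.bor_of_nonneg (Int.natCast_nonneg _) ih]
    exact Int.natCast_nonneg _

lemma pvA_nonneg (b s : Int) (hs : 0 ≤ s) : 0 ≤ pvA b s := by
  induction b, s using pvA.induct with
  | case1 b s h => rw [pvA.eq_def]; simp [h]
  | case2 b s h ih =>
    rw [pvA.eq_def]; simp only [h, dif_neg]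
    have h1 : (0:Int) ≤ s <<< b.toNat := by
      rw [Int.shiftLeft_eq]; positivity
    have h2 : 0 ≤ pvA (PySem.Int.floordiv (b - 1) 2) (1 - PySem.Int.band b 1) := by
      apply ih
      rw [PySem.Int.band_one]
      rcases PySem.Int.mod_two_eq b with h|h <;> omega
    rw [PySem.Int.bor_of_nonneg h1 h2]
    exact Int.natCast_nonneg _

lemma pvBit_bor {x y : Int} (hx : 0 ≤ x) (hy : 0 ≤ y) (i : Nat) :
    (PySem.Int.band (PySem.Int.bor x y) (1 <<< i) ≠ 0) ↔
      (PySem.Int.band x (1 <<< i) ≠ 0 ∨ PySem.Int.band y (1 <<< i) ≠ 0) := by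
  rw [pvBit_iff hx, pvBit_iff hy,
    pvBit_iff (x := PySem.Int.bor x y) (by rw [PySem.Int.bor_of_nonneg hx hy]; exact Int.natCast_nonneg _)]
  rw [PySem.Int.bor_of_nonneg hx hy]
  simp

lemma pvBit_shift {s : Int} (hs : s = 0 ∨ s = 1) (j i : Nat) :
    (PySem.Int.band (s <<< j) (1 <<< i) ≠ 0) ↔ (s = 1 ∧ i = j) := by
  have hnn : (0:Int) ≤ s <<< j := by
    rw [Int.shiftLeft_eq]; rcases hs with h|h <;> subst h <;> positivity
  rw [pvBit_iff hnn]
  rcases hs with h|h <;> subst h <;> simp [Int.shiftLeft_eq]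
  rw [show ((2:Int)^j).toNat = 2^j from by
      rw [show ((2:Int)^j) = ((2^j:Nat):Int) from by push_cast; ring, Int.toNat_natCast],
    Nat.testBit_two_pow]
  simp [eq_comm]

lemma pvNotBand (b : Int) : PySem.Int.band 1 (Int.not b) = 1 - PySem.Int.band b 1 := by
  rw [PySem.Int.band_comm, PySem.Int.band_one, PySem.Int.band_one]
  rw [PySem.Int.mod_eq_emod_of_pos (by omega), PySem.Int.mod_eq_emod_of_pos (by omega)]
  have hne : Int.not b = -b - 1 := by
    cases b with
    | ofNat n => simp [Int.not]; omega
    | negSucc n => simp [Int.not]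
  rw [hne]; omega

lemma pvBandOne (b : Int) : PySem.Int.band b 1 = 0 ∨ PySem.Int.band b 1 = 1 := by
  rw [PySem.Int.band_one]; exact PySem.Int.mod_two_eq b

-- bor is associative on nonnegative arguments
lemma pvBorAssoc {x y z : Int} (hx : 0 ≤ x) (hy : 0 ≤ y) (hz : 0 ≤ z) :
    PySem.Int.bor (PySem.Int.bor x y) z = PySem.Int.bor x (PySem.Int.bor y z) := by
  rw [PySem.Int.bor_of_nonneg hx hy, PySem.Int.bor_of_nonneg hy hz,
    PySem.Int.bor_of_nonneg (Int.natCast_nonneg _) hz,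
    PySem.Int.bor_of_nonneg hx (Int.natCast_nonneg _)]
  simp [Nat.lor_assoc]

-- A's loop in terms of pvM / pvA
lemma pvALoop_eq : ∀ (m a b : Int), 0 ≤ b → 0 ≤ m → 0 ≤ a →
    pvALoop m a b = (PySem.Int.bor m (pvM b),
      PySem.Int.bor a (pvA (PySem.Int.floordiv (b - 1) 2) (1 - PySem.Int.band b 1))) := by
  intro m a b
  induction m, a, b using pvALoop.induct with
  | case1 m a b h => intro hb _ _; omega
  | case2 m a b h m' b' hge ih =>
    intro hb hm ha
    have hge0 : (0:Int) ≤ PySem.Int.floordiv (b - 1) 2 := hge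
    have hx : (0:Int) ≤ ((1 <<< b.toNat : Nat) : Int) := Int.natCast_nonneg _
    have hy : (0:Int) ≤ PySem.Int.band 1 (Int.not b) <<< (PySem.Int.floordiv (b - 1) 2).toNat := by
      rw [Int.shiftLeft_eq, pvNotBand]
      rcases pvBandOne b with h1|h1 <;> rw [h1] <;> positivity
    have hm2 : (0:Int) ≤ PySem.Int.bor m (1 <<< b.toNat) := by
      rw [PySem.Int.bor_of_nonneg hm hx]; exact Int.natCast_nonneg _
    have ha2 : (0:Int) ≤ PySem.Int.bor a
        (PySem.Int.band 1 (Int.not b) <<< (PySem.Int.floordiv (b - 1) 2).toNat) := by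
      rw [PySem.Int.bor_of_nonneg ha hy]; exact Int.natCast_nonneg _
    have step : pvALoop m a b = pvALoop (PySem.Int.bor m (1 <<< b.toNat))
        (PySem.Int.bor a (PySem.Int.band 1 (Int.not b) <<< (PySem.Int.floordiv (b - 1) 2).toNat))
        (PySem.Int.floordiv (b - 1) 2) := by
      rw [pvALoop.eq_def, dif_neg h, dif_pos hge0]
    rw [step]
    refine ((ih hge hm2 ha2).trans ?_)
    refine Prod.ext ?_ ?_
    · show PySem.Int.bor (PySem.Int.bor m (1 <<< b.toNat)) (pvM (PySem.Int.floordiv (b - 1) 2))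
        = PySem.Int.bor m (pvM b)
      rw [pvM.eq_def (b := b), dif_neg h]
      exact pvBorAssoc hm hx (pvM_nonneg _)
    · show PySem.Int.bor (PySem.Int.bor a
            (PySem.Int.band 1 (Int.not b) <<< (PySem.Int.floordiv (b - 1) 2).toNat))
          (pvA (PySem.Int.floordiv (PySem.Int.floordiv (b - 1) 2 - 1) 2)
            (1 - PySem.Int.band (PySem.Int.floordiv (b - 1) 2) 1))
        = PySem.Int.bor a (pvA (PySem.Int.floordiv (b - 1) 2) (1 - PySem.Int.band b 1))
      rw [pvA.eq_def (b := PySem.Int.floordiv (b - 1) 2)]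
      rw [dif_neg (show ¬ (PySem.Int.floordiv (b - 1) 2 < 0) from by omega)]
      rw [pvNotBand]
      refine pvBorAssoc ha ?_ (pvA_nonneg _ _ ?_)
      · rw [Int.shiftLeft_eq]
        rcases pvBandOne b with h1|h1 <;> rw [h1] <;> positivity
      · rcases pvBandOne (PySem.Int.floordiv (b - 1) 2) with h1|h1 <;> omega
  | case3 m a b h b' hge =>
    intro hb hm ha
    have hng : ¬ (0:Int) ≤ PySem.Int.floordiv (b - 1) 2 := hge
    have hb2 : PySem.Int.floordiv (b - 1) 2 < 0 := by omega
    have step : pvALoop m a b = (PySem.Int.bor m (1 <<< b.toNat), a) := by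
      rw [pvALoop.eq_def, dif_neg h, dif_neg hng]
    rw [step]
    refine Prod.ext ?_ ?_
    · show PySem.Int.bor m (1 <<< b.toNat) = PySem.Int.bor m (pvM b)
      rw [pvM.eq_def (b := b), dif_neg h]
      rw [pvM.eq_def (b := PySem.Int.floordiv (b - 1) 2), dif_pos hb2, PySem.Int.bor_zero]
    · show a = PySem.Int.bor a (pvA (PySem.Int.floordiv (b - 1) 2) (1 - PySem.Int.band b 1))
      rw [pvA.eq_def (b := PySem.Int.floordiv (b - 1) 2), dif_pos hb2, PySem.Int.bor_zero]

-- path structure facts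
lemma pvPath_mem (b s : Int) : ∀ p ∈ pvPath b s, 0 ≤ p.1 ∧ p.1 ≤ b ∧ (p.2 = 0 ∨ p.2 = 1) := by
  induction b, s using pvPath.induct with
  | case1 b s h => rw [pvPath.eq_def]; simp [h]
  | case2 b s h ih =>
    rw [pvPath.eq_def]; simp only [h, dif_neg]
    intro p hp
    rcases List.mem_cons.mp hp with rfl | hpt
    · exact ⟨by simp; omega, by simp, by split_ifs <;> simp⟩
    · have h2 : PySem.Int.floordiv (b - 1) 2 = (b - 1) / 2 :=
        PySem.Int.floordiv_eq_ediv_of_pos (by omega)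
      have := ih p hpt
      exact ⟨this.1, by omega, this.2.2⟩

lemma pvPath_pairwise (b s : Int) : (pvPath b s).Pairwise (fun p q => q.1 < p.1) := by
  induction b, s using pvPath.induct with
  | case1 b s h => rw [pvPath.eq_def]; simp [h]
  | case2 b s h ih =>
    rw [pvPath.eq_def]; simp only [h, dif_neg]
    refine List.pairwise_cons.mpr ⟨?_, ih⟩
    intro q hq
    have h2 : PySem.Int.floordiv (b - 1) 2 = (b - 1) / 2 :=
      PySem.Int.floordiv_eq_ediv_of_pos (by omega)
    have := pvPath_mem _ _ q hq
    simp; omega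

-- bit characterisation of A's masks against the path
lemma pvBit_pow (j i : Nat) :
    (PySem.Int.band ((1 <<< j : Nat) : Int) (1 <<< i) ≠ 0) ↔ i = j := by
  rw [pvBit_iff (Int.natCast_nonneg _)]
  simp only [Int.toNat_natCast, Nat.shiftLeft_eq, Nat.one_mul, Nat.testBit_two_pow]
  simp [eq_comm]

lemma pvM_bit : ∀ (b : Int), 0 ≤ b → ∀ (s : Int) (i : Nat),
    (PySem.Int.band (pvM b) (1 <<< i) ≠ 0) ↔ (i : Int) ∈ (pvPath b s).map Prod.fst := by
  intro b
  induction b using pvM.induct with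
  | case1 b h => intro hb; omega
  | case2 b h ih =>
    intro hb s i
    have hpath : pvPath b s =
        (b, if s ≠ 0 then 0 else 1) :: pvPath (PySem.Int.floordiv (b - 1) 2) (1 - PySem.Int.band b 1) := by
      rw [pvPath.eq_def, dif_neg h]
    rw [pvM.eq_def (b := b), dif_neg h, hpath]
    rw [pvBit_bor (Int.natCast_nonneg _) (pvM_nonneg _) i]
    rw [pvBit_pow]
    simp only [List.map_cons, List.mem_cons]
    by_cases hge : 0 ≤ PySem.Int.floordiv (b - 1) 2
    · rw [ih hge (1 - PySem.Int.band b 1) i]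
      constructor
      · rintro (rfl | hmem)
        · left; omega
        · right; exact hmem
      · rintro (heq | hmem)
        · left; omega
        · right; exact hmem
    · have hlt : PySem.Int.floordiv (b - 1) 2 < 0 := by omega
      have hM0 : pvM (PySem.Int.floordiv (b - 1) 2) = 0 := by rw [pvM.eq_def, dif_pos hlt]
      have hP0 : pvPath (PySem.Int.floordiv (b - 1) 2) (1 - PySem.Int.band b 1) = [] := by
        rw [pvPath.eq_def, dif_pos hlt]
      rw [hM0, hP0]
      have hz : ¬ (PySem.Int.band 0 (1 <<< i) ≠ 0) := by
        rw [pvBit_iff le_rfl]; simp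
      simp only [hz, List.map_nil, List.not_mem_nil, or_false, false_or]
      constructor
      · rintro rfl; omega
      · intro heq; omega

lemma pvA_bit : ∀ (b : Int), 0 ≤ b → ∀ (s : Int), (s = 0 ∨ s = 1) → ∀ (i : Nat),
    (PySem.Int.band (pvA b s) (1 <<< i) ≠ 0) ↔ ((i : Int), (0:Int)) ∈ pvPath b s := by
  intro b
  induction b using pvM.induct with
  | case1 b h => intro hb; omega
  | case2 b h ih =>
    intro hb s hs i
    have hs' : 1 - PySem.Int.band b 1 = 0 ∨ 1 - PySem.Int.band b 1 = 1 := by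
      rcases pvBandOne b with h1|h1 <;> omega
    have hpath : pvPath b s =
        (b, if s ≠ 0 then 0 else 1) :: pvPath (PySem.Int.floordiv (b - 1) 2) (1 - PySem.Int.band b 1) := by
      rw [pvPath.eq_def, dif_neg h]
    have hshift : (0:Int) ≤ s <<< b.toNat := by
      rw [Int.shiftLeft_eq]; rcases hs with h1|h1 <;> rw [h1] <;> positivity
    rw [pvA.eq_def (b := b), dif_neg h, hpath]
    rw [pvBit_bor hshift (pvA_nonneg _ _ (by omega)) i]
    rw [pvBit_shift hs]
    simp only [List.mem_cons]
    have hhead : (s = 1 ∧ i = b.toNat) ↔ ((i : Int), (0:Int)) = (b, if s ≠ 0 then 0 else 1) := by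
      constructor
      · rintro ⟨rfl, rfl⟩
        simp; omega
      · intro heq
        rw [Prod.mk.injEq] at heq
        rcases hs with h1|h1
        · exfalso; rw [h1] at heq; simp at heq
        · exact ⟨h1, by omega⟩
    rw [hhead]
    by_cases hge : 0 ≤ PySem.Int.floordiv (b - 1) 2
    · rw [ih hge (1 - PySem.Int.band b 1) hs' i]
    · have hlt : PySem.Int.floordiv (b - 1) 2 < 0 := by omega
      have hA0 : pvA (PySem.Int.floordiv (b - 1) 2) (1 - PySem.Int.band b 1) = 0 := by
        rw [pvA.eq_def, dif_pos hlt]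
      have hP0 : pvPath (PySem.Int.floordiv (b - 1) 2) (1 - PySem.Int.band b 1) = [] := by
        rw [pvPath.eq_def, dif_pos hlt]
      rw [hA0, hP0]
      have hz : ¬ (PySem.Int.band 0 (1 <<< i) ≠ 0) := by
        rw [pvBit_iff le_rfl]; simp
      simp [hz]
      exact fun hcon => absurd hcon hz

-- B's loop collects the filtered path
lemma pvBLoop_eq (b setbit ways : Int) (pairs : List (Int × Int)) :
    pvBLoop b setbit ways pairs =
      pairs ++ (pvPath b setbit).filter (fun p => decide (p.1 < ways - 1)) := by
  induction b, setbit, pairs using pvBLoop.induct ways with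
  | case1 b s pairs h => rw [pvBLoop.eq_def, pvPath.eq_def]; simp [h]
  | case2 b s pairs h ih =>
    simp only [dite_eq_ite] at ih
    have hstep : pvBLoop b s ways pairs =
        pvBLoop (PySem.Int.floordiv (b - 1) 2) (1 - PySem.Int.band b 1) ways
          (if b < ways - 1 then pairs ++ [(b, if s ≠ 0 then 0 else 1)] else pairs) := by
      rw [pvBLoop.eq_def]; simp [h]
    have hpath : pvPath b s =
        (b, if s ≠ 0 then 0 else 1) :: pvPath (PySem.Int.floordiv (b - 1) 2) (1 - PySem.Int.band b 1) := by
      rw [pvPath.eq_def]; simp [h]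
    rw [hstep, ih, hpath]
    by_cases hlt : b < ways - 1 <;> simp [hlt, List.filter_cons]

-- filters on a strictly-decreasing list
lemma pvFilter_succ_mem {l : List (Int × Int)} (hp : l.Pairwise (fun p q => q.1 < p.1))
    {k : Int} {v : Int} (hm : (k, v) ∈ l) :
    l.filter (fun p => decide (p.1 < k + 1)) = (k, v) :: l.filter (fun p => decide (p.1 < k)) := by
  induction l with
  | nil => cases hm
  | cons p t ih =>
    rcases List.pairwise_cons.mp hp with ⟨hall, hpt⟩
    rcases List.mem_cons.mp hm with rfl | hmt
    · rw [List.filter_cons_of_pos (by simp), List.filter_cons_of_neg (by simp)]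
      refine congrArg (List.cons (k,v)) (List.filter_congr fun q hq => ?_)
      have h3 : q.1 < k := by simpa using hall q hq
      simp only [decide_eq_decide]
      omega
    · have hk : k < p.1 := hall _ hmt
      simp only [List.filter_cons]
      have c1 : ¬ (p.1 < k + 1) := by omega
      have c2 : ¬ (p.1 < k) := by omega
      simp only [c1, c2, decide_false]
      exact ih hpt hmt

lemma pvFilter_succ_not_mem {l : List (Int × Int)} {k : Int} (hm : k ∉ l.map Prod.fst) :
    l.filter (fun p => decide (p.1 < k + 1)) = l.filter (fun p => decide (p.1 < k)) := by
  apply List.filter_congr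
  intro p hpl
  have : p.1 ≠ k := fun he => hm (he ▸ List.mem_map_of_mem hpl)
  simp only [decide_eq_decide]
  omega

-- the dict of a nodup-key pair list is that list
lemma pvOfList_items (l : List (Int × Int)) (h : (l.map Prod.fst).Nodup) :
    (PySem.Dict.ofList l : PySem.Dict Int Int).items = l := by
  show (PySem.Dict.update PySem.Dict.empty l).items = l
  unfold PySem.Dict.update
  have := PySem.Dict.items_foldl_insert_fresh (l := l) (k := Prod.fst) (v := Prod.snd)
      (d := (PySem.Dict.empty : PySem.Dict Int Int)) (fun a _ => by simp) h
  simpa using this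

-- keys occur once: same key, same value
lemma pvMem_unique {l : List (Int × Int)} (h : (l.map Prod.fst).Nodup)
    {k a b : Int} (h1 : (k, a) ∈ l) (h2 : (k, b) ∈ l) : a = b := by
  induction l with
  | nil => cases h1
  | cons p t ih =>
    simp only [List.map_cons, List.nodup_cons] at h
    rcases List.mem_cons.mp h1 with rfl | m1 <;> rcases List.mem_cons.mp h2 with he | m2
    · cases he; rfl
    · exact absurd (List.mem_map_of_mem (f := Prod.fst) m2) h.1
    · cases he; exact absurd (List.mem_map_of_mem (f := Prod.fst) m1) h.1
    · exact ih h.2 m1 m2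

-- A's collection fold, by induction on the range bound
lemma pvFold_eq (M A : Int) (b s : Int) (hb : 0 ≤ b)
    (hM : ∀ i : Nat, (PySem.Int.band M (1 <<< i) ≠ 0) ↔ (i : Int) ∈ (pvPath b s).map Prod.fst)
    (hA : ∀ i : Nat, (PySem.Int.band A (1 <<< i) ≠ 0) ↔ ((i : Int), (0:Int)) ∈ pvPath b s) :
    ∀ k : Nat,
      ((PySem.List.pyRange 0 (k : Int) 1).foldl (fun d i =>
        if PySem.Int.band M (1 <<< i.toNat) ≠ 0 then
          d.insert i (if PySem.Int.band A (1 <<< i.toNat) ≠ 0 then (0:Int) else 1)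
        else d) (PySem.Dict.empty : PySem.Dict Int Int)).items
      = ((pvPath b s).filter (fun p => decide (p.1 < (k : Int)))).reverse := by
  intro k
  have hnodup : ((pvPath b s).map Prod.fst).Nodup := by
    have hp := pvPath_pairwise b s
    exact ((List.pairwise_map).mpr hp).imp (fun h => ne_of_gt h)
  induction k with
  | zero =>
    rw [show ((0:Nat):Int) = 0 from rfl, PySem.List.pyRange_one_eq_nil le_rfl]
    simp only [List.foldl_nil]
    have hf : (pvPath b s).filter (fun p => decide (p.1 < (0:Int))) = [] := by
      apply List.filter_eq_nil_iff.mpr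
      intro p hp
      have := pvPath_mem b s p hp
      simp only [decide_eq_true_eq]
      omega
    rw [hf]
    rfl
  | succ k ih =>
    have hcast : ((k+1 : Nat) : Int) = (k : Int) + 1 := by push_cast; ring
    rw [hcast, PySem.List.pyRange_one_succ_right (Int.natCast_nonneg k), List.foldl_append]
    simp only [List.foldl_cons, List.foldl_nil]
    by_cases hmem : (k : Int) ∈ (pvPath b s).map Prod.fst
    · have hmem' : ((((k : Int)).toNat : Nat) : Int) ∈ (pvPath b s).map Prod.fst := hmem
      rw [if_pos ((hM (((k : Int)).toNat)).mpr hmem')]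
      have hcont : (((PySem.List.pyRange 0 (k : Int) 1).foldl (fun d i =>
          if PySem.Int.band M (1 <<< i.toNat) ≠ 0 then
            d.insert i (if PySem.Int.band A (1 <<< i.toNat) ≠ 0 then (0:Int) else 1)
          else d) (PySem.Dict.empty : PySem.Dict Int Int))).contains (k : Int) = false := by
        rw [PySem.Dict.contains_eq_decide_mem_keys]
        simp only [decide_eq_false_iff_not]
        intro hk
        have hkeq : ((PySem.List.pyRange 0 (k : Int) 1).foldl (fun d i =>
            if PySem.Int.band M (1 <<< i.toNat) ≠ 0 then
              d.insert i (if PySem.Int.band A (1 <<< i.toNat) ≠ 0 then (0:Int) else 1)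
            else d) (PySem.Dict.empty : PySem.Dict Int Int)).keys
            = (((pvPath b s).filter (fun p => decide (p.1 < (k:Int)))).reverse).map Prod.fst := by
          show ((PySem.List.pyRange 0 (k : Int) 1).foldl (fun d i =>
            if PySem.Int.band M (1 <<< i.toNat) ≠ 0 then
              d.insert i (if PySem.Int.band A (1 <<< i.toNat) ≠ 0 then (0:Int) else 1)
            else d) (PySem.Dict.empty : PySem.Dict Int Int)).items.map Prod.fst = _
          rw [ih]
        rw [hkeq] at hk
        rcases List.mem_map.mp hk with ⟨p, hp, hpk⟩
        have := List.of_mem_filter (List.mem_reverse.mp hp)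
        simp only [decide_eq_true_eq] at this
        omega
      rw [PySem.Dict.items_insert_of_not_contains _ _ hcont, ih]
      rcases List.mem_map.mp hmem with ⟨⟨k', v⟩, hpv, hk'⟩
      simp only at hk'
      subst hk'
      have hv01 := (pvPath_mem b s _ hpv).2.2
      simp only at hv01
      have hval : (if PySem.Int.band A ((1 <<< ((k : Int)).toNat : Nat) : Int) ≠ 0
          then (0:Int) else 1) = v := by
        rcases hv01 with rfl | rfl
        · exact if_pos ((hA (((k : Int)).toNat)).mpr
            (show (((((k : Int)).toNat : Nat) : Int), (0:Int)) ∈ pvPath b s from hpv))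
        · apply if_neg
          intro hbit
          have h0 : ((k : Int), (0:Int)) ∈ pvPath b s := (hA (((k : Int)).toNat)).mp hbit
          have := pvMem_unique hnodup h0 hpv
          omega
      rw [hval, pvFilter_succ_mem (pvPath_pairwise b s) hpv]
      simp
    · have hmem' : ¬ (((((k : Int)).toNat : Nat) : Int) ∈ (pvPath b s).map Prod.fst) := hmem
      rw [if_neg ((not_iff_not.mpr (hM (((k : Int)).toNat))).mpr hmem'), ih,
        pvFilter_succ_not_mem hmem]

-- ===== VERDICT (by name: the statement is the Claim_ definition above) =====
theorem getTouchedBits_spec : Claim_equal_getTouchedBits := by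
  intro way ways _ hpre
  unfold Pre_getTouchedBits at hpre
  show getTouchedBits way ways = getTouchedBits_alt way ways
  have hb0 : 0 ≤ PySem.Int.floordiv way 2 + (ways - 1 - PySem.Int.floordiv ways 2) := by omega
  have hs0 : PySem.Int.band 1 way = 0 ∨ PySem.Int.band 1 way = 1 := by
    rw [PySem.Int.band_comm]; exact pvBandOne way
  have hshift : (0:Int) ≤ PySem.Int.band 1 way <<<
      (PySem.Int.floordiv way 2 + (ways - 1 - PySem.Int.floordiv ways 2)).toNat := by
    rw [Int.shiftLeft_eq]; rcases hs0 with h1|h1 <;> rw [h1] <;> positivity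
  have hA : getTouchedBits way ways =
      ((pvPath (PySem.Int.floordiv way 2 + (ways - 1 - PySem.Int.floordiv ways 2))
        (PySem.Int.band 1 way)).filter (fun p => decide (p.1 < ways - 1))).reverse := by
    show (if PySem.Int.floordiv way 2 + (ways - 1 - PySem.Int.floordiv ways 2) < 0 then []
      else ((PySem.List.pyRange 0 (ways - 1) 1).foldl (fun d i =>
        if PySem.Int.band (pvALoop 0 (PySem.Int.band 1 way <<<
            (PySem.Int.floordiv way 2 + (ways - 1 - PySem.Int.floordiv ways 2)).toNat)
            (PySem.Int.floordiv way 2 + (ways - 1 - PySem.Int.floordiv ways 2))).1 (1 <<< i.toNat) ≠ 0 then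
          d.insert i (if PySem.Int.band (pvALoop 0 (PySem.Int.band 1 way <<<
            (PySem.Int.floordiv way 2 + (ways - 1 - PySem.Int.floordiv ways 2)).toNat)
            (PySem.Int.floordiv way 2 + (ways - 1 - PySem.Int.floordiv ways 2))).2 (1 <<< i.toNat) ≠ 0
            then (0:Int) else 1)
        else d) (PySem.Dict.empty : PySem.Dict Int Int)).items) = _
    rw [if_neg (by omega)]
    rw [pvALoop_eq 0 _ _ hb0 le_rfl hshift]
    have hM0 : PySem.Int.bor 0
        (pvM (PySem.Int.floordiv way 2 + (ways - 1 - PySem.Int.floordiv ways 2)))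
        = pvM (PySem.Int.floordiv way 2 + (ways - 1 - PySem.Int.floordiv ways 2)) := by
      rw [PySem.Int.bor_comm, PySem.Int.bor_zero]
    have hA0 : pvA (PySem.Int.floordiv way 2 + (ways - 1 - PySem.Int.floordiv ways 2))
          (PySem.Int.band 1 way)
        = PySem.Int.bor (PySem.Int.band 1 way <<<
            (PySem.Int.floordiv way 2 + (ways - 1 - PySem.Int.floordiv ways 2)).toNat)
          (pvA (PySem.Int.floordiv
              (PySem.Int.floordiv way 2 + (ways - 1 - PySem.Int.floordiv ways 2) - 1) 2)
            (1 - PySem.Int.band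
              (PySem.Int.floordiv way 2 + (ways - 1 - PySem.Int.floordiv ways 2)) 1)) := by
      rw [pvA.eq_def (b := PySem.Int.floordiv way 2 + (ways - 1 - PySem.Int.floordiv ways 2)),
        dif_neg (by omega)]
    simp only [hM0, ← hA0]
    by_cases hle : ways - 1 ≤ 0
    · rw [PySem.List.pyRange_one_eq_nil hle]
      simp only [List.foldl_nil]
      have hf : (pvPath (PySem.Int.floordiv way 2 + (ways - 1 - PySem.Int.floordiv ways 2))
          (PySem.Int.band 1 way)).filter (fun p => decide (p.1 < ways - 1)) = [] := by
        apply List.filter_eq_nil_iff.mpr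
        intro p hp
        have := pvPath_mem _ _ p hp
        simp only [decide_eq_true_eq]
        omega
      rw [hf]
      rfl
    · have hk : (((ways - 1).toNat : Int)) = ways - 1 := Int.toNat_of_nonneg (by omega)
      have hfold := pvFold_eq _ _ _ _ hb0
        (pvM_bit _ hb0 (PySem.Int.band 1 way))
        (pvA_bit _ hb0 (PySem.Int.band 1 way) hs0) ((ways - 1).toNat)
      rw [hk] at hfold
      exact hfold
  have hbb : PySem.Int.floordiv way 2 + ways - 1 - PySem.Int.floordiv ways 2
      = PySem.Int.floordiv way 2 + (ways - 1 - PySem.Int.floordiv ways 2) := by ring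
  have hB : getTouchedBits_alt way ways =
      ((pvPath (PySem.Int.floordiv way 2 + (ways - 1 - PySem.Int.floordiv ways 2))
        (PySem.Int.band 1 way)).filter (fun p => decide (p.1 < ways - 1))).reverse := by
    show (PySem.Dict.ofList (pvBLoop
        (PySem.Int.floordiv way 2 + ways - 1 - PySem.Int.floordiv ways 2)
        (PySem.Int.band 1 way) ways []).reverse : PySem.Dict Int Int).items = _
    rw [hbb, pvBLoop_eq, List.nil_append]
    apply pvOfList_items
    rw [List.map_reverse]
    apply List.nodup_reverse.mpr
    have hsub : (((pvPath (PySem.Int.floordiv way 2 + (ways - 1 - PySem.Int.floordiv ways 2))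
        (PySem.Int.band 1 way)).filter (fun p => decide (p.1 < ways - 1))).map Prod.fst).Sublist
        (((pvPath (PySem.Int.floordiv way 2 + (ways - 1 - PySem.Int.floordiv ways 2))
        (PySem.Int.band 1 way)).map Prod.fst)) :=
      List.filter_sublist.map Prod.fst
    refine List.Nodup.sublist hsub ?_
    exact ((List.pairwise_map).mpr (pvPath_pairwise _ _)).imp (fun h => ne_of_gt h)
  rw [hA, hB]
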